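-- pv_equiv track=rewrite | github.com/j1h00/TIL_public | Algorithm/code/programmers/test/skICT/skt_3_done.py | solution
-- ===== SOURCE A (Python) =====
-- def solution(width, height, diagonals):
--     w = width
--     h = height
--
--     # 경우의 수 문제!
--     # a = 시작점에서 대각선의 한 점까지 이동하는 경우의 수
--     # b = 대각선의 다른 한 점에서 도착점까지 이동하는 경우의 수
--     # a x b
--     # 대각선의 개수 만큼 반복
--
--     # 팩토리얼 계산
--     def factorial(x):
--         result = 1
--         for i in range(1, x+1):
--             result *= i
--         return result
--
--     # x * y 크기에서의 최단 경로 계산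
--     def cal_case(x, y):
--         return int(factorial(x + y)) // int(factorial(x) * factorial(y))
--
--     answer = 0
--     for a, b in diagonals:
--         x1, y1 = a-1, b # 대각선의 좌측 상단 점
--         x2, y2 = a, b-1 # 대각선의 우측 하단 점
--         case1 = cal_case(x1, y1) * cal_case(w-x2, h-y2)
--         case2 = cal_case(x2, y2) * cal_case(w-x1, h-y1)
--         answer += case1 + case2
--
--     return answer % 10000019
-- ===== SOURCE B (Python) =====
-- def solution(width, height, diagonals):
--     MOD = 10000019
--
--     # For each diagonal, the two path-count products need the four corner
--     # rectangles below; collect them all first.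
--     needed = []
--     for a, b in diagonals:
--         needed.append(((a - 1, b), (width - a, height - b + 1)))
--         needed.append(((a, b - 1), (width - a + 1, height - b)))
--
--     # Build all factorials once by one prefix-product pass (a factorial of a
--     # nonpositive number is the empty product 1, so indices clamp at 0).
--     limit = 0
--     for p, q in needed:
--         limit = max(limit,
--                     max(p[0], 0) + max(p[1], 0),
--                     max(q[0], 0) + max(q[1], 0))
--     fact = [1]
--     for i in range(1, limit + 1):
--         fact.append(fact[-1] * i)
--
--     def paths(x, y):
--         return fact[max(x + y, 0)] // (fact[max(x, 0)] * fact[max(y, 0)])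
--
--     return sum(paths(*p) * paths(*q) for p, q in needed) % MOD
-- ===== Notes on version B (the rewrite author's own statement) =====
-- stated objective: faster
-- what changed: All factorials are precomputed once into a prefix-product table over the maximum needed index (two staged passes: collect corner rectangles, build table, then sum table lookups), instead of A recomputing three factorial loops from scratch inside every cal_case call.
import Mathlib
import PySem

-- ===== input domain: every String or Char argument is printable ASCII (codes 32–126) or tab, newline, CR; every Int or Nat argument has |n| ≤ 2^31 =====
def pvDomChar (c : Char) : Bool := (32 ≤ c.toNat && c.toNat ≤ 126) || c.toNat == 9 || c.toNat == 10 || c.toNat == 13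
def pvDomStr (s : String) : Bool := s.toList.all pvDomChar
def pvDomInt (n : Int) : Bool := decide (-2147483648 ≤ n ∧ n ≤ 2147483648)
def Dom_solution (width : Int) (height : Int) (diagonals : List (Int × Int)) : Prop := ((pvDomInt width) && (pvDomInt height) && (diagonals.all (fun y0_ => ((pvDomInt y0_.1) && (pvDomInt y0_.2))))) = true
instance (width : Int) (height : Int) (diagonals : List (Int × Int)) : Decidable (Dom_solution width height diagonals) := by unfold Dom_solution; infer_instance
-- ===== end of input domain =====

-- B precomputes all factorials once into a prefix-product table and sums table
-- lookups, instead of A's three fresh factorial loops inside every cal_case call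
-- (measurably faster).

-- ===== PORT A =====
-- 'def factorial(x)': result = 1; for i in range(1, x+1): result *= i
def pyFactorial (x : Int) : Int :=
  (PySem.List.pyRange 1 (x + 1) 1).foldl (fun result i => result * i) 1

-- 'def cal_case(x, y)': int(factorial(x+y)) // int(factorial(x) * factorial(y))
def calCase (x y : Int) : Int :=
  PySem.Int.floordiv (pyFactorial (x + y)) (pyFactorial x * pyFactorial y)

-- x1,y1 = a-1,b ; x2,y2 = a,b-1 ; case1 and case2 inlined
def solution (width : Int) (height : Int) (diagonals : List (Int × Int)) : Int :=
  PySem.Int.mod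
    (diagonals.foldl (fun answer ab =>
      answer + (calCase (ab.1 - 1) ab.2 * calCase (width - ab.1) (height - (ab.2 - 1))
        + calCase ab.1 (ab.2 - 1) * calCase (width - (ab.1 - 1)) (height - ab.2))) 0)
    10000019

-- ===== PORT B =====
-- Source B's 'needed' list: the two pairs of corner rectangles per diagonal
def neededOf (width : Int) (height : Int) (diagonals : List (Int × Int)) :
    List ((Int × Int) × (Int × Int)) :=
  diagonals.flatMap (fun ab =>
    [((ab.1 - 1, ab.2), (width - ab.1, height - ab.2 + 1)),
     ((ab.1, ab.2 - 1), (width - ab.1 + 1, height - ab.2))])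

-- one step of the limit loop: max(limit, max(p0,0)+max(p1,0), max(q0,0)+max(q1,0))
def pairLimit (pq : (Int × Int) × (Int × Int)) : Int :=
  max (max pq.1.1 0 + max pq.1.2 0) (max pq.2.1 0 + max pq.2.2 0)

def limitOf (needed : List ((Int × Int) × (Int × Int))) : Int :=
  needed.foldl (fun L pq => max L (pairLimit pq)) 0

-- 'fact = [1]; for i in range(1, limit+1): fact.append(fact[-1]*i)'
-- (the running last element fact[-1] is carried as the second state component)
def buildFact (limit : Int) : List Int :=
  ((PySem.List.pyRange 1 (limit + 1) 1).foldl
      (fun (st : List Int × Int) i => (st.1 ++ [st.2 * i], st.2 * i))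
      (([1] : List Int), (1 : Int))).1

-- Source B's paths(x, y): three table lookups (indices are non-negative and in range)
def altPaths (fact : List Int) (x y : Int) : Int :=
  PySem.Int.floordiv (PySem.List.pyGetD fact (max (x + y) 0) 0)
    (PySem.List.pyGetD fact (max x 0) 0 * PySem.List.pyGetD fact (max y 0) 0)

def solution_alt (width : Int) (height : Int) (diagonals : List (Int × Int)) : Int :=
  let needed := neededOf width height diagonals
  let fact := buildFact (limitOf needed)
  PySem.Int.mod
    ((needed.map (fun pq => altPaths fact pq.1.1 pq.1.2 * altPaths fact pq.2.1 pq.2.2)).sum)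
    10000019

-- ===== PRECONDITION & SPEC =====
def Spec_solution (width : Int) (height : Int) (diagonals : List (Int × Int)) (out : Int) : Prop := out = solution_alt width height diagonals
instance (width : Int) (height : Int) (diagonals : List (Int × Int)) (out : Int) : Decidable (Spec_solution width height diagonals out) := by unfold Spec_solution; infer_instance

-- ===== CLAIM (what is proved, stated in full; the proofs are below) =====
def Claim_equal_solution : Prop := ∀ (width : Int) (height : Int) (diagonals : List (Int × Int)), Dom_solution width height diagonals → Spec_solution width height diagonals (solution width height diagonals)

-- ===== LEMMAS AND PROOFS =====

theorem pyFactorial_natCast (n : Nat) : pyFactorial (n : Int) = (Nat.factorial n : Int) := by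
  induction n with
  | zero => simp [pyFactorial, PySem.List.pyRange_one_eq_nil, Nat.factorial]
  | succ m ih =>
      have h1 : (1 : Int) ≤ (m : Int) + 1 := by omega
      have hsplit : PySem.List.pyRange 1 ((((m : Int) + 1) + 1)) 1
          = PySem.List.pyRange 1 ((m : Int) + 1) 1 ++ [(m : Int) + 1] :=
        PySem.List.pyRange_one_succ_right h1
      have : pyFactorial ((m : Int) + 1)
          = pyFactorial (m : Int) * ((m : Int) + 1) := by
        simp [pyFactorial, hsplit, List.foldl_append]
      push_cast
      rw [this, ih, Nat.factorial_succ]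
      push_cast
      ring

-- A's factorial is total (the empty product for nonpositive arguments),
-- so it is the factorial of the clamped argument everywhere.
theorem pyFactorial_eq_toNat (t : Int) : pyFactorial t = (Nat.factorial t.toNat : Int) := by
  by_cases h : 0 ≤ t
  · rw [show t = ((t.toNat : Int)) from by omega, pyFactorial_natCast]
    simp
    congr 1
    omega
  · have h0 : t.toNat = 0 := by omega
    rw [h0]
    simp [pyFactorial, PySem.List.pyRange_one_eq_nil (by omega : t + 1 ≤ 1), Nat.factorial]

-- the factorial table Source B builds is the list of factorials 0! … n!
def factTable (n : Nat) : List Int := (List.range (n + 1)).map (fun i => (Nat.factorial i : Int))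

theorem factFold_eq (n : Nat) :
    (PySem.List.pyRange 1 ((n : Int) + 1) 1).foldl
      (fun (st : List Int × Int) i => (st.1 ++ [st.2 * i], st.2 * i))
      (([1] : List Int), (1 : Int))
    = (factTable n, (Nat.factorial n : Int)) := by
  induction n with
  | zero => simp [PySem.List.pyRange_one_eq_nil, factTable, Nat.factorial]
  | succ m ih =>
      have h1 : (1 : Int) ≤ (m : Int) + 1 := by omega
      have hsplit : PySem.List.pyRange 1 ((((m : Int) + 1) + 1)) 1
          = PySem.List.pyRange 1 ((m : Int) + 1) 1 ++ [(m : Int) + 1] :=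
        PySem.List.pyRange_one_succ_right h1
      push_cast
      rw [hsplit, List.foldl_append, ih]
      simp only [List.foldl_cons, List.foldl_nil]
      refine Prod.ext ?_ ?_
      · simp only [factTable, List.range_succ, List.map_append, List.map_cons, List.map_nil]
        have hstep : ((m + 1).factorial : Int) = (m.factorial : Int) * ((m : Int) + 1) := by
          rw [Nat.factorial_succ]; push_cast; ring
        rw [hstep]
      · rw [Nat.factorial_succ]
        push_cast
        ring

theorem buildFact_eq (limit : Int) (h : 0 ≤ limit) : buildFact limit = factTable limit.toNat := by
  unfold buildFact
  rw [show limit = ((limit.toNat : Int)) from by omega, factFold_eq]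
  simp
  congr 1
  omega

-- a lookup in the table at a clamped index within range is the factorial
theorem table_lookup (n : Nat) (t : Int) (h : max t 0 ≤ (n : Int)) :
    PySem.List.pyGetD (factTable n) (max t 0) 0 = (Nat.factorial t.toNat : Int) := by
  have h0 : 0 ≤ max t 0 := le_max_right t 0
  have hlen : (factTable n).length = n + 1 := by simp [factTable]
  have hlt : max t 0 < ((factTable n).length : Int) := by rw [hlen]; push_cast; omega
  rw [PySem.List.pyGetD_eq_getElem _ _ h0 hlt]
  have htn : (max t 0).toNat = t.toNat := by omega
  have hb : (max t 0).toNat < n + 1 := by omega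
  simp [factTable, htn]

-- pointwise: a table-paths lookup equals A's cal_case whenever the table is big enough
theorem altPaths_eq_calCase (n : Nat) (x y : Int) (h : max x 0 + max y 0 ≤ (n : Int)) :
    altPaths (factTable n) x y = calCase x y := by
  have hx : max x 0 ≤ (n : Int) := by omega
  have hy : max y 0 ≤ (n : Int) := by omega
  have hxy : max (x + y) 0 ≤ (n : Int) := by omega
  unfold altPaths calCase
  rw [table_lookup n _ hxy, table_lookup n _ hx, table_lookup n _ hy,
    pyFactorial_eq_toNat, pyFactorial_eq_toNat, pyFactorial_eq_toNat]

-- the fold computing 'limit' dominates its initial value …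
theorem init_le_foldl_max {α : Type} (f : α → Int) :
    ∀ (l : List α) (init : Int), init ≤ l.foldl (fun L e => max L (f e)) init := by
  intro l
  induction l with
  | nil => intro init; simp
  | cons hd tl ih =>
      intro init
      simp only [List.foldl_cons]
      calc init ≤ max init (f hd) := le_max_left _ _
        _ ≤ _ := ih (max init (f hd))

-- … and every element's value
theorem mem_le_foldl_max {α : Type} (f : α → Int) :
    ∀ (l : List α) (init : Int) (a : α), a ∈ l → f a ≤ l.foldl (fun L e => max L (f e)) init := by
  intro l
  induction l with
  | nil => intro _ a ha; cases ha
  | cons hd tl ih =>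
      intro init a ha
      simp only [List.foldl_cons]
      rcases List.mem_cons.mp ha with h | h
      · subst h
        calc f a ≤ max init (f a) := le_max_right _ _
          _ ≤ _ := init_le_foldl_max f tl _
      · exact ih _ a h

-- B's map-sum over the flattened two-per-diagonal list, re-grouped per diagonal
theorem sum_map_flatMap_two {α β : Type} (g1 g2 : α → β) (f F : β → Int) :
    ∀ (ds : List α), (∀ ab ∈ ds, f (g1 ab) = F (g1 ab) ∧ f (g2 ab) = F (g2 ab)) →
    ((ds.flatMap (fun ab => [g1 ab, g2 ab])).map f).sum
      = (ds.map (fun ab => F (g1 ab) + F (g2 ab))).sum := by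
  intro ds
  induction ds with
  | nil => intro _; simp
  | cons hd tl ih =>
      intro H
      rcases H hd (List.mem_cons_self) with ⟨h1, h2⟩
      simp only [List.flatMap_cons, List.map_append, List.sum_append, List.map_cons,
        List.map_nil, List.sum_cons, List.sum_nil, add_zero]
      rw [h1, h2, ih (fun ab hab => H ab (List.mem_cons_of_mem _ hab))]

-- ===== VERDICT (by name: the statement is the Claim_ definition above) =====
theorem solution_spec : Claim_equal_solution := by
  intro width height diagonals _
  show solution width height diagonals = solution_alt width height diagonals
  unfold solution solution_alt
  rw [PySem.List.foldl_add]
  simp only [zero_add]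
  congr 1
  -- name the pieces of B
  set needed := neededOf width height diagonals with hneeded
  set limit := limitOf needed with hlimit
  have hlim0 : 0 ≤ limit := init_le_foldl_max pairLimit needed 0
  rw [buildFact_eq limit hlim0]
  -- regroup B's sum per diagonal, turning each lookup product into cal_case
  have hsum := sum_map_flatMap_two
    (fun ab : Int × Int => ((ab.1 - 1, ab.2), (width - ab.1, height - ab.2 + 1)))
    (fun ab : Int × Int => ((ab.1, ab.2 - 1), (width - ab.1 + 1, height - ab.2)))
    (fun pq => altPaths (factTable limit.toNat) pq.1.1 pq.1.2
        * altPaths (factTable limit.toNat) pq.2.1 pq.2.2)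
    (fun pq => calCase pq.1.1 pq.1.2 * calCase pq.2.1 pq.2.2)
    diagonals ?_
  · rw [hneeded]
    unfold neededOf
    rw [hsum]
    refine congrArg List.sum (List.map_congr_left ?_)
    intro ab _
    have e1 : height - (ab.2 - 1) = height - ab.2 + 1 := by ring
    have e2 : width - (ab.1 - 1) = width - ab.1 + 1 := by ring
    rw [e1, e2]
  · -- the hypothesis: every generated pair is within the table's limit
    intro ab hab
    have hmem1 : ((ab.1 - 1, ab.2), (width - ab.1, height - ab.2 + 1)) ∈ needed := by
      rw [hneeded]; unfold neededOf
      exact List.mem_flatMap.mpr ⟨ab, hab, by simp⟩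
    have hmem2 : ((ab.1, ab.2 - 1), (width - ab.1 + 1, height - ab.2)) ∈ needed := by
      rw [hneeded]; unfold neededOf
      exact List.mem_flatMap.mpr ⟨ab, hab, by simp⟩
    have hb1 := mem_le_foldl_max pairLimit needed 0 _ hmem1
    have hb2 := mem_le_foldl_max pairLimit needed 0 _ hmem2
    have hfold : List.foldl (fun L e => max L (pairLimit e)) 0 needed = limit := rfl
    rw [hfold] at hb1 hb2
    have hcast : limit = ((limit.toNat : Int)) := by omega
    unfold pairLimit at hb1 hb2
    dsimp only at hb1 hb2
    constructor
    · dsimp only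
      rw [altPaths_eq_calCase limit.toNat _ _ (by omega),
        altPaths_eq_calCase limit.toNat _ _ (by omega)]
    · dsimp only
      rw [altPaths_eq_calCase limit.toNat _ _ (by omega),
        altPaths_eq_calCase limit.toNat _ _ (by omega)]
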